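-- pv_equiv track=rewrite | github.com/freesummerwind/polinom_roots_finder | algorythm.py | get_next_element
-- ===== SOURCE A (Python) =====
-- from typing import Dict, List
--
-- def get_next_element(element: str, polinom: List[int]) -> str:
--     """
--     Функция для поиска следующей степени образующего элемента поля
--     :param element: str, элемент поля
--     :param polinom: List[int], неприводимый полином, корень которого образует поле
--     :return: str, следующий элемент поля
--     """
--     new_element = element[1:] + '0'
--     if element[0] == '0':
--         return new_element
--     for i in range(len(new_element)):
--         if polinom[i + 1] == 1:
--             new_element = new_element[:i] + str(int(new_element[i] == '0')) + new_element[i+1:]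
--     return new_element
-- ===== SOURCE B (Python) =====
-- def _bits_to_int(s):
--     v = 0
--     for c in s:
--         v = 2 * v + (c == '1')
--     return v
--
--
-- def _int_to_bits(n, v):
--     if n == 0:
--         return ''
--     return _int_to_bits(n - 1, v // 2) + ('1' if v % 2 == 1 else '0')
--
--
-- def get_next_element(element, polinom):
--     n = len(element)
--     shifted = (2 * _bits_to_int(element)) % (1 << n)
--     if element[0] == '1':
--         shifted ^= _bits_to_int(''.join('1' if polinom[i + 1] == 1 else '0' for i in range(n)))
--     return _int_to_bits(n, shifted)
-- ===== Notes on version B (the rewrite author's own statement) =====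
-- stated objective: alternative
-- what changed: B switches data structure: it converts the bitstring to an integer, performs the GF(2^n) multiply-by-x as (2v) mod 2^n followed by an integer xor with a mask built once from the polynomial, and re-formats to n binary digits, instead of A's per-character string-slicing update loop.
-- outside the precondition, e.g. on get_next_element('x1', [1, 1, 1]): A returns '01', B returns '10'
import Mathlib
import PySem

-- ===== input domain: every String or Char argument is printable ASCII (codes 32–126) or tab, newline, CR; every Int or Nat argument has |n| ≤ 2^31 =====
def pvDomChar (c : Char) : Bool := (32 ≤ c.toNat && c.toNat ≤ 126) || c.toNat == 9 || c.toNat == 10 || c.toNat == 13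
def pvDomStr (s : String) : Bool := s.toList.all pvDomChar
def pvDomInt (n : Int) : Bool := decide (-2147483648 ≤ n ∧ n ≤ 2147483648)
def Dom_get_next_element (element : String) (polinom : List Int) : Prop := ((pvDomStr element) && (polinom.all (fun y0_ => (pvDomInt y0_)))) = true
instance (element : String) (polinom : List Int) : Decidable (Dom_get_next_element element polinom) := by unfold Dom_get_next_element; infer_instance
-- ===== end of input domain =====

-- B re-implements the GF(2^n) multiply-by-x on the INTEGER value of the bitstring
-- (accumulate v, take (2v) mod 2^n, xor an integer mask, re-format to n bits) instead of
-- A's per-character string-slicing loop (objective: alternative algorithm/data structure).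


-- ===== PORT A =====
-- loop body: if polinom[i+1] == 1: new_element = new_element[:i] + str(int(new_element[i]=='0')) + new_element[i+1:]
-- (new_element[i] and polinom[i+1] are always in range under Pre_, so .getD is exact there)
def aStep (polinom : List Int) (ne : List Char) (i : Int) : List Char :=
  if (PySem.List.pyGet? polinom (i + 1)).getD 0 = 1 then
    PySem.List.slice ne none (some i) ++
      [if (PySem.List.pyGet? ne i).getD ' ' = '0' then '1' else '0'] ++
      PySem.List.slice ne (some (i + 1)) none
  else ne

def get_next_element (element : String) (polinom : List Int) : String :=
  let s := element.toList
  let ne0 := PySem.List.slice s (some 1) none ++ ['0']       -- element[1:] + '0'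
  if (PySem.List.pyGet? s 0).getD ' ' = '0' then             -- element[0] (nonempty under Pre_)
    String.ofList ne0
  else
    String.ofList ((PySem.List.pyRange 0 (ne0.length : Int) 1).foldl (aStep polinom) ne0)

-- ===== PORT B =====
-- v = 0; for c in s: v = 2*v + (c == '1')
def bitsToInt (cs : List Char) : Int :=
  cs.foldl (fun v c => 2 * v + (if c = '1' then 1 else 0)) 0

-- _int_to_bits(n, v): n-digit binary rendering built by the recursion of Source B
def intToBits : Nat → Int → List Char
  | 0, _ => []
  | m + 1, v =>
      intToBits m (PySem.Int.floordiv v 2) ++ [if PySem.Int.mod v 2 = 1 then '1' else '0']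

def get_next_element_alt (element : String) (polinom : List Int) : String :=
  let s := element.toList
  let n := s.length
  let shifted := PySem.Int.mod (2 * bitsToInt s) ((1 : Int) <<< n)   -- (2*v) % (1 << n)
  if (PySem.List.pyGet? s 0).getD ' ' = '1' then                     -- element[0] (nonempty under Pre_)
    String.ofList (intToBits n (PySem.Int.bxor shifted
      (bitsToInt ((PySem.List.pyRange 0 (n : Int) 1).map
        (fun i => if PySem.List.pyGetD polinom (i + 1) 0 = 1 then '1' else '0')))))
  else
    String.ofList (intToBits n shifted)

-- ===== PRECONDITION & SPEC =====
-- Pre_ excludes: empty element (A raises IndexError on element[0]); when element[0] != '0',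
-- polinom shorter than len(element)+1 (A raises IndexError on polinom[i+1]); and elements that
-- are not bitstrings over '0'/'1' — outside the function's natural GF(2^n) domain, where A's
-- character flipping returns strings B's integer representation cannot (and should not) mirror.
def Pre_get_next_element (element : String) (polinom : List Int) : Prop :=
  element.toList.length ≠ 0 ∧
    element.toList.all (fun c => c == '0' || c == '1') = true ∧
    ((element.toList.headD ' ' == '0') = true ∨ element.toList.length + 1 ≤ polinom.length)
instance (element : String) (polinom : List Int) : Decidable (Pre_get_next_element element polinom) := by unfold Pre_get_next_element; infer_instance

def pvWitness_get_next_element : String × List Int := ("10", [1, 0, 1])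

def Spec_get_next_element (element : String) (polinom : List Int) (out : String) : Prop := out = get_next_element_alt element polinom
instance (element : String) (polinom : List Int) (out : String) : Decidable (Spec_get_next_element element polinom out) := by unfold Spec_get_next_element; infer_instance

-- ===== CLAIM (what is proved, stated in full; the proofs are below) =====
def Claim_equal_get_next_element : Prop := ∀ (element : String) (polinom : List Int), Dom_get_next_element element polinom → Pre_get_next_element element polinom → Spec_get_next_element element polinom (get_next_element element polinom)

-- ===== LEMMAS AND PROOFS =====

-- character-level flip A performs at a tap, and the xor-character B's mask realises
def bFlip (c : Char) (p : Int) : Char :=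
  if p = 1 then (if c = '0' then '1' else '0') else c

def xorC (c m : Char) : Char :=
  if m = '1' then (if c = '1' then '0' else '1') else c

-- Nat-valued mirror of bitsToInt, for the arithmetic lemmas
def bitsN (cs : List Char) : Nat :=
  cs.foldl (fun v c => 2 * v + (if c = '1' then 1 else 0)) 0

theorem bitsToInt_eq_nat : ∀ (cs : List Char) (a : Nat),
    cs.foldl (fun v c => 2 * v + (if c = '1' then 1 else 0)) ((a : Nat) : Int)
      = ((cs.foldl (fun v c => 2 * v + (if c = '1' then 1 else 0)) a : Nat) : Int) := by
  intro cs
  induction cs with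
  | nil => intro a; rfl
  | cons c rest ih =>
    intro a
    have h : (2 * (a : Int) + (if c = '1' then 1 else 0))
        = (((2 * a + (if c = '1' then 1 else 0) : Nat)) : Int) := by
      by_cases hc : c = '1' <;> simp [hc]
    simp only [List.foldl_cons, h]
    exact ih _

theorem bitsN_init : ∀ (cs : List Char) (a : Nat),
    cs.foldl (fun v c => 2 * v + (if c = '1' then 1 else 0)) a
      = a * 2 ^ cs.length + bitsN cs := by
  intro cs
  induction cs with
  | nil => intro a; simp [bitsN]
  | cons c rest ih =>
    intro a
    have h1 := ih (2 * a + (if c = '1' then 1 else 0))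
    have h2 := ih (2 * 0 + (if c = '1' then 1 else 0))
    simp only [List.foldl_cons, bitsN] at *
    rw [h1, h2]
    simp only [List.length_cons, pow_succ]
    ring

theorem bitsN_append (bs : List Char) (c : Char) :
    bitsN (bs ++ [c]) = 2 * bitsN bs + (if c = '1' then 1 else 0) := by
  simp [bitsN, List.foldl_append]

theorem bitsN_lt (bs : List Char) : bitsN bs < 2 ^ bs.length := by
  induction bs using List.reverseRecOn with
  | nil => simp [bitsN]
  | append_singleton bs c ih =>
    rw [bitsN_append, List.length_append]
    have hb : (if c = '1' then 1 else 0) ≤ 1 := by split <;> omega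
    have hp : 2 ^ (bs.length + [c].length) = 2 * 2 ^ bs.length := by
      simp [pow_succ]; ring
    simp only [List.length_cons, List.length_nil] at hp ⊢
    omega

theorem intToBits_bitsN (bs : List Char) (hb : ∀ c ∈ bs, c = '0' ∨ c = '1') :
    intToBits bs.length ((bitsN bs : Nat) : Int) = bs := by
  induction bs using List.reverseRecOn with
  | nil => rfl
  | append_singleton bs c ih =>
    have hc : c = '0' ∨ c = '1' := hb c (by simp)
    have hbs : ∀ x ∈ bs, x = '0' ∨ x = '1' := fun x hx => hb x (by simp [hx])
    have hbit : (if c = '1' then 1 else 0) ≤ 1 := by split <;> omega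
    set M := bitsN (bs ++ [c]) with hM
    have hMv : M = 2 * bitsN bs + (if c = '1' then 1 else 0) := bitsN_append bs c
    have hlen : (bs ++ [c]).length = bs.length + 1 := by simp
    rw [hlen]
    show intToBits bs.length (PySem.Int.floordiv (M : Int) 2) ++
        [if PySem.Int.mod (M : Int) 2 = 1 then '1' else '0'] = bs ++ [c]
    have hdiv : PySem.Int.floordiv (M : Int) 2 = ((M / 2 : Nat) : Int) := by
      exact_mod_cast PySem.Int.floordiv_natCast M 2
    have hmod : PySem.Int.mod (M : Int) 2 = ((M % 2 : Nat) : Int) := by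
      exact_mod_cast PySem.Int.mod_natCast M 2
    have hd2 : M / 2 = bitsN bs := by omega
    have hm2 : M % 2 = (if c = '1' then 1 else 0) := by omega
    rw [hdiv, hmod, hd2, hm2, ih hbs]
    rcases hc with hc | hc <;> simp [hc]

theorem intToBits_bitsN' (n : Nat) (bs : List Char) (h : n = bs.length)
    (hb : ∀ c ∈ bs, c = '0' ∨ c = '1') :
    intToBits n ((bitsN bs : Nat) : Int) = bs := by
  subst h
  exact intToBits_bitsN bs hb

theorem xor_core (a b bx bY : Nat) (h1 : bx ≤ 1) (h2 : bY ≤ 1) :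
    (2 * a + bx) ^^^ (2 * b + bY) = 2 * (a ^^^ b) + (bx ^^^ bY) := by
  interval_cases bx <;> interval_cases bY <;>
    first
      | simpa [Nat.bit_val] using Nat.xor_bit false a false b
      | simpa [Nat.bit_val] using Nat.xor_bit false a true b
      | simpa [Nat.bit_val] using Nat.xor_bit true a false b
      | simpa [Nat.bit_val] using Nat.xor_bit true a true b

theorem bitsN_xor : ∀ (ys xs : List Char), xs.length = ys.length →
    bitsN xs ^^^ bitsN ys = bitsN (List.zipWith xorC xs ys) := by
  intro ys
  induction ys using List.reverseRecOn with
  | nil =>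
    intro xs h
    have hx : xs = [] := List.eq_nil_of_length_eq_zero (by simpa using h)
    subst hx
    rfl
  | append_singleton ys y ih =>
    intro xs h
    rcases List.eq_nil_or_concat xs with hx | ⟨xs', x, hx⟩
    · subst hx; simp at h
    · subst hx
      rw [List.concat_eq_append]
      rw [List.concat_eq_append] at h
      have hlen : xs'.length = ys.length := by simpa using h
      rw [List.zipWith_append hlen, bitsN_append, bitsN_append,
          List.zipWith_cons_cons, List.zipWith_nil_right, bitsN_append,
          xor_core _ _ _ _ (by split <;> omega) (by split <;> omega), ih xs' hlen]
      congr 1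
      by_cases hy : y = '1' <;> by_cases hxx : x = '1' <;> simp [xorC, hy, hxx]

-- A's in-place update loop over indices [done.length, done.length+todo.length) equals a zip,
-- position by position: each step rewrites exactly the head of the remaining suffix.
theorem loop_eq_zip (polinom : List Int) :
    ∀ (todo done : List Char),
      done.length + todo.length + 1 ≤ polinom.length →
      (PySem.List.pyRange (done.length : Int) ((done.length + todo.length : Nat) : Int) 1).foldl
          (aStep polinom) (done ++ todo)
        = done ++ List.zipWith bFlip todo (polinom.drop (done.length + 1)) := by
  intro todo
  induction todo with
  | nil =>
    intro done h
    rw [PySem.List.pyRange_one_eq_nil (by simp : ((done.length + ([] : List Char).length : Nat) : Int) ≤ (done.length : Int))]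
    simp
  | cons c rest ih =>
    intro done h
    have hj : (done.length : Int) < ((done.length + (c :: rest).length : Nat) : Int) := by
      simp
    rw [PySem.List.pyRange_one_cons hj]
    have hlt : done.length + 1 < polinom.length := by simp at h; omega
    have hget : PySem.List.pyGet? polinom ((done.length : Int) + 1) = some polinom[done.length + 1] := by
      have : (done.length : Int) + 1 = ((done.length + 1 : Nat) : Int) := by push_cast; ring
      rw [this, PySem.List.pyGet?_natCast]
      simp [List.getElem?_eq_getElem hlt]
    have hstep : aStep polinom (done ++ c :: rest) (done.length : Int)
        = (done ++ [bFlip c polinom[done.length + 1]]) ++ rest := by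
      unfold aStep bFlip
      rw [hget]
      have hget2 : PySem.List.pyGet? (done ++ c :: rest) (done.length : Int) = some c := by
        rw [PySem.List.pyGet?_natCast]
        simp
      by_cases hp : polinom[done.length + 1] = 1
      · simp only [hp, hget2, Option.getD_some]
        have h1 : PySem.List.slice (done ++ c :: rest) none (some (done.length : Int))
            = done := by
          rw [PySem.List.slice_to_natCast]
          simp
        have h2 : PySem.List.slice (done ++ c :: rest) (some ((done.length : Int) + 1)) none
            = rest := by
          have : (done.length : Int) + 1 = ((done.length + 1 : Nat) : Int) := by push_cast; ring
          rw [this, PySem.List.slice_from_natCast]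
          simp
        rw [h1, h2]
        simp
      · simp [hp]
    have hlen : ((done.length : Int) + 1) = (((done ++ [bFlip c polinom[done.length + 1]]).length : Nat) : Int) := by
      simp
    have hlen2 : ((done.length + (c :: rest).length : Nat) : Int)
        = (((done ++ [bFlip c polinom[done.length + 1]]).length + rest.length : Nat) : Int) := by
      simp; ring
    rw [List.foldl_cons, hstep, hlen, hlen2,
        ih (done ++ [bFlip c polinom[done.length + 1]]) (by simp at h ⊢; omega),
        List.drop_eq_getElem_cons hlt, List.zipWith_cons_cons]
    simp

-- ===== VERDICT (by name: the statement is the Claim_ definition above) =====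
theorem bin_zipWith_xorC : ∀ (xs ys : List Char), (∀ c ∈ xs, c = '0' ∨ c = '1') →
    ∀ c ∈ List.zipWith xorC xs ys, c = '0' ∨ c = '1' := by
  intro xs
  induction xs with
  | nil => intro ys _ c hc; simp at hc
  | cons x xs ih =>
    intro ys hb c hc
    cases ys with
    | nil => simp at hc
    | cons y ys =>
      rw [List.zipWith_cons_cons, List.mem_cons] at hc
      rcases hc with hc | hc
      · subst hc
        unfold xorC
        split
        · split <;> simp
        · exact hb x (by simp)
      · exact ih ys (fun d hd => hb d (by simp [hd])) c hc

theorem zip_flip_eq_zip_xor (polinom : List Int) (t : List Char)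
    (hb : ∀ c ∈ t, c = '0' ∨ c = '1') (hlen : t.length + 1 ≤ polinom.length) :
    List.zipWith bFlip t (polinom.drop 1)
      = List.zipWith xorC t
          ((PySem.List.pyRange 0 (t.length : Int) 1).map
            (fun i => if PySem.List.pyGetD polinom (i + 1) 0 = 1 then '1' else '0')) := by
  apply List.ext_getElem
  · simp [PySem.List.length_pyRange_one]
    omega
  · intro i h1 h2
    have hi : i < t.length := by simp at h1; omega
    have hip : i + 1 < polinom.length := by omega
    rw [List.getElem_zipWith, List.getElem_zipWith, List.getElem_map,
        PySem.List.getElem_pyRange_one, List.getElem_drop]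
    have h1i : polinom[1 + i]'(by omega) = polinom[i + 1]'hip := by
      congr 1
      omega
    have hcast : ((0 : Int) + (i : Nat) + 1) = ((i + 1 : Nat) : Int) := by push_cast; ring
    have hget : PySem.List.pyGetD polinom ((0 : Int) + (i : Nat) + 1) 0 = polinom[i + 1]'hip := by
      rw [hcast, PySem.List.pyGetD_natCast, List.getD_eq_getElem?_getD,
          List.getElem?_eq_getElem hip]
      rfl
    simp only [h1i, hget]
    rcases hb (t[i]'hi) (List.getElem_mem hi) with hc | hc <;>
      by_cases hp : polinom[i + 1]'hip = 1 <;> simp [bFlip, xorC, hc, hp]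

theorem bitsToInt_eq_bitsN (cs : List Char) : bitsToInt cs = ((bitsN cs : Nat) : Int) := by
  have h := bitsToInt_eq_nat cs 0
  simpa [bitsToInt, bitsN] using h

theorem bitsN_cons (c : Char) (rest : List Char) :
    bitsN (c :: rest) = (if c = '1' then 1 else 0) * 2 ^ rest.length + bitsN rest := by
  have h := bitsN_init rest (2 * 0 + (if c = '1' then 1 else 0))
  simpa [bitsN, List.foldl_cons] using h

theorem one_shl_eq (n : Nat) : (1 : Int) <<< n = ((2 ^ n : Nat) : Int) := by
  simp [Int.shiftLeft_eq]

-- ===== VERDICT (by name: the statement is the Claim_ definition above) =====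
theorem get_next_element_spec : Claim_equal_get_next_element := by
  intro element polinom _ hpre
  obtain ⟨hne0, hbinB, hcaseB⟩ := hpre
  have hne : element.toList ≠ [] := by
    intro h
    rw [h] at hne0
    simp at hne0
  have hbin : ∀ c ∈ element.toList, c = '0' ∨ c = '1' := by
    intro c hc
    simpa using List.all_eq_true.1 hbinB c hc
  have hcase : element.toList.headD ' ' = '0' ∨ element.toList.length + 1 ≤ polinom.length := by
    rcases hcaseB with h | h
    · left; simpa using h
    · right; exact h
  unfold Spec_get_next_element get_next_element get_next_element_alt
  obtain ⟨c0, rest, hs⟩ : ∃ c0 rest, element.toList = c0 :: rest := by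
    cases h : element.toList with
    | nil => exact absurd h hne
    | cons a l => exact ⟨a, l, rfl⟩
  rw [hs] at hbin hcase ⊢
  have hget0 : PySem.List.pyGet? (c0 :: rest) 0 = some c0 := by
    rw [show (0 : Int) = ((0 : Nat) : Int) by norm_num, PySem.List.pyGet?_natCast]
    simp
  have htail : PySem.List.slice (c0 :: rest) (some 1) none ++ ['0'] = rest ++ ['0'] := by
    rw [PySem.List.slice_from_one]
    simp
  have hbt : ∀ c ∈ rest ++ ['0'], c = '0' ∨ c = '1' := by
    intro c hc
    rcases List.mem_append.1 hc with hc | hc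
    · exact hbin c (List.mem_cons_of_mem _ hc)
    · left; simpa using hc
  have hL : (c0 :: rest).length = (rest ++ ['0']).length := by simp
  have hrl : bitsN rest < 2 ^ rest.length := bitsN_lt rest
  simp only [hget0, Option.getD_some, htail, hL]
  have hshift : PySem.Int.mod (2 * bitsToInt (c0 :: rest))
      ((1 : Int) <<< (rest ++ ['0']).length) = ((bitsN (rest ++ ['0']) : Nat) : Int) := by
    rw [bitsToInt_eq_bitsN, one_shl_eq,
        show 2 * ((bitsN (c0 :: rest) : Nat) : Int) = ((2 * bitsN (c0 :: rest) : Nat) : Int) by push_cast; ring,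
        PySem.Int.mod_natCast]
    congr 1
    rw [bitsN_cons]
    have hap : bitsN (rest ++ ['0']) = 2 * bitsN rest := by
      rw [bitsN_append]; simp
    have hll : (rest ++ ['0']).length = rest.length + 1 := by simp
    rw [hap, hll]
    by_cases hc : c0 = '1' <;> simp only [hc, if_true, if_false]
    · have h2 : 2 * (1 * 2 ^ rest.length + bitsN rest)
          = 2 ^ (rest.length + 1) * 1 + 2 * bitsN rest := by ring
      rw [h2, Nat.mul_add_mod]
      apply Nat.mod_eq_of_lt
      have : 2 ^ (rest.length + 1) = 2 * 2 ^ rest.length := by ring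
      omega
    · have h2 : 2 * (0 * 2 ^ rest.length + bitsN rest) = 2 * bitsN rest := by ring
      rw [h2]
      apply Nat.mod_eq_of_lt
      have : 2 ^ (rest.length + 1) = 2 * 2 ^ rest.length := by ring
      omega
  rcases hbin c0 List.mem_cons_self with h0 | h0
  · -- leading '0': A returns the shifted string, B renders 2v mod 2^n
    rw [if_pos h0, if_neg (by simp [h0]), hshift, intToBits_bitsN _ hbt]
  · -- leading '1': A's tap loop = zip with bFlip; B xors the mask integer
    rw [if_neg (by simp [h0]), if_pos (by simp [h0])]
    have hplen : (rest ++ ['0']).length + 1 ≤ polinom.length := by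
      rcases hcase with hh | hh
      · simp [h0] at hh
      · simpa [hL] using hh
    -- A side
    have hz := loop_eq_zip polinom (rest ++ ['0']) [] (by simpa using hplen)
    simp only [List.length_nil, List.nil_append, Nat.cast_zero, zero_add] at hz
    rw [hz]
    -- B side
    rw [hshift, bitsToInt_eq_bitsN, PySem.Int.bxor_natCast,
        bitsN_xor _ _ (by simp [PySem.List.length_pyRange_one])]
    have hzl : (List.zipWith xorC (rest ++ ['0'])
        ((PySem.List.pyRange 0 ((rest ++ ['0']).length : Int) 1).map
          (fun i => if PySem.List.pyGetD polinom (i + 1) 0 = 1 then '1' else '0'))).length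
        = (rest ++ ['0']).length := by
      simp [PySem.List.length_pyRange_one]
    rw [intToBits_bitsN' _ _ hzl.symm (bin_zipWith_xorC _ _ hbt),
        zip_flip_eq_zip_xor polinom (rest ++ ['0']) hbt hplen]
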